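-- pv_equiv track=rewrite | github.com/Necroraijin/Inbriq | src/agents/multi_agent_coordinator.py | _determine_consensus_severity
-- ===== SOURCE A (Python) =====
-- from typing import Dict, List, Any, Optional
--
-- def _determine_consensus_severity(detection_insights: Dict[str, Any], intelligence_insights: Dict[str, Any]) -> str:
--     """Determine consensus severity between agents"""
--     detection_severity = detection_insights.get("severity", "medium")
--     intelligence_risk = intelligence_insights.get("risk_assessment", {}).get("risk_level", "medium")
--
--     # Use higher severity if there's a conflict
--     severity_order = {"low": 1, "medium": 2, "high": 3, "critical": 4}
--
--     detection_level = severity_order.get(detection_severity, 2)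
--     intelligence_level = severity_order.get(intelligence_risk, 2)
--
--     max_level = max(detection_level, intelligence_level)
--
--     for severity, level in severity_order.items():
--         if level == max_level:
--             return severity
--
--     return "medium"
-- ===== SOURCE B (Python) =====
-- def _determine_consensus_severity(detection_insights, intelligence_insights):
--     """Determine consensus severity between agents"""
--     det = detection_insights.get("severity", "medium")
--     intel = intelligence_insights.get("risk_assessment", {}).get("risk_level", "medium")
--     # anything that is not a recognised level counts as "medium"
--     if det not in ("low", "high", "critical"):
--         det = "medium"
--     if intel not in ("low", "high", "critical"):
--         intel = "medium"
--     # priority chain: first severity class that either side belongs to wins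
--     if "critical" in (det, intel):
--         return "critical"
--     if "high" in (det, intel):
--         return "high"
--     if "medium" in (det, intel):
--         return "medium"
--     return "low"
-- ===== Notes on version B (the rewrite author's own statement) =====
-- stated objective: simpler
-- what changed: Drops the numeric ranks entirely: instead of mapping both severities to integers, taking max and scanning the dict back to a string, B normalises unknown values to "medium" and decides by a direct priority chain of string comparisons (critical, then high, then medium, else low), so no rank table, no max and no reverse lookup exist.
import Mathlib
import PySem

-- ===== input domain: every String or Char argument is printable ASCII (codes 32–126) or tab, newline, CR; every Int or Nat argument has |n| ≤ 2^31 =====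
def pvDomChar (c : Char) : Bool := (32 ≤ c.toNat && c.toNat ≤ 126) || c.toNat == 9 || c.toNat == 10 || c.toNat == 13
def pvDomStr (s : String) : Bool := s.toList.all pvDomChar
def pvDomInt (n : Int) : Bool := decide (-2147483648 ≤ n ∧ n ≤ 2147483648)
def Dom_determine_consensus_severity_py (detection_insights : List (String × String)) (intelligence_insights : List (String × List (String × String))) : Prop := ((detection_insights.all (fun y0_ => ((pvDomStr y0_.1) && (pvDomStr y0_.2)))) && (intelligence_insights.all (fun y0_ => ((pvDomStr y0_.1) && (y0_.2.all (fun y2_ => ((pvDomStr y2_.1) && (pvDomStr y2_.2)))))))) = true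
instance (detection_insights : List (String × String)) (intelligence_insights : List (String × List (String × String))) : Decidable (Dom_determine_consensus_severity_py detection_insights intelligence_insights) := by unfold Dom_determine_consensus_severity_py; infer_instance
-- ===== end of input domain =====

-- B drops A's numeric rank table, max and reverse dict scan for a direct priority
-- chain of string comparisons after normalising unknown values (objective: simpler).

-- ===== PORT A =====
-- severity_order = {"low": 1, "medium": 2, "high": 3, "critical": 4}
def pvSevOrder : PySem.Dict String Int :=
  PySem.Dict.ofList [("low", 1), ("medium", 2), ("high", 3), ("critical", 4)]

-- 'for severity, level in severity_order.items(): if level == max_level: return severity' / 'return "medium"'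
def pvScanA : List (String × Int) → Int → String
  | [], _ => "medium"
  | (severity, level) :: rest, max_level =>
      if level = max_level then severity else pvScanA rest max_level

def determine_consensus_severity_py (detection_insights : List (String × String)) (intelligence_insights : List (String × List (String × String))) : String :=
  let detection_severity := (PySem.Dict.ofList detection_insights).getD "severity" "medium"
  let intelligence_risk :=
    (PySem.Dict.ofList ((PySem.Dict.ofList intelligence_insights).getD "risk_assessment" [])).getD "risk_level" "medium"
  let detection_level := pvSevOrder.getD detection_severity 2
  let intelligence_level := pvSevOrder.getD intelligence_risk 2
  let max_level := max detection_level intelligence_level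
  pvScanA pvSevOrder.items max_level

-- ===== PORT B =====
-- 'if x not in ("low", "high", "critical"): x = "medium"' (done for both sides in Source B)
def pvNormB (s : String) : String :=
  if (["low", "high", "critical"] : List String).contains s then s else "medium"

def determine_consensus_severity_py_alt (detection_insights : List (String × String)) (intelligence_insights : List (String × List (String × String))) : String :=
  let det := pvNormB ((PySem.Dict.ofList detection_insights).getD "severity" "medium")
  let intel := pvNormB ((PySem.Dict.ofList ((PySem.Dict.ofList intelligence_insights).getD "risk_assessment" [])).getD "risk_level" "medium")
  -- priority chain: first severity class that either side belongs to wins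
  if det = "critical" ∨ intel = "critical" then "critical"
  else if det = "high" ∨ intel = "high" then "high"
  else if det = "medium" ∨ intel = "medium" then "medium"
  else "low"

-- ===== PRECONDITION & SPEC =====
def Spec_determine_consensus_severity_py (detection_insights : List (String × String)) (intelligence_insights : List (String × List (String × String))) (out : String) : Prop := out = determine_consensus_severity_py_alt detection_insights intelligence_insights
instance (detection_insights : List (String × String)) (intelligence_insights : List (String × List (String × String))) (out : String) : Decidable (Spec_determine_consensus_severity_py detection_insights intelligence_insights out) := by unfold Spec_determine_consensus_severity_py; infer_instance

-- ===== CLAIM (what is proved, stated in full; the proofs are below) =====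
def Claim_equal_determine_consensus_severity_py : Prop := ∀ (detection_insights : List (String × String)) (intelligence_insights : List (String × List (String × String))), Dom_determine_consensus_severity_py detection_insights intelligence_insights → Spec_determine_consensus_severity_py detection_insights intelligence_insights (determine_consensus_severity_py detection_insights intelligence_insights)

-- ===== LEMMAS AND PROOFS =====

-- every string falls into one of four canonical (A-rank, B-normal-form) pairs
lemma pvNorm_spec (s : String) :
    (pvSevOrder.getD s 2 = 1 ∧ pvNormB s = "low") ∨
    (pvSevOrder.getD s 2 = 2 ∧ pvNormB s = "medium") ∨
    (pvSevOrder.getD s 2 = 3 ∧ pvNormB s = "high") ∨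
    (pvSevOrder.getD s 2 = 4 ∧ pvNormB s = "critical") := by
  by_cases h1 : s = "low"
  · subst h1; decide
  by_cases h2 : s = "medium"
  · subst h2; decide
  by_cases h3 : s = "high"
  · subst h3; decide
  by_cases h4 : s = "critical"
  · subst h4; decide
  have b1 : (("low" : String) == s) = false := by
    rw [beq_eq_false_iff_ne]; exact fun h => h1 h.symm
  have b2 : (("medium" : String) == s) = false := by
    rw [beq_eq_false_iff_ne]; exact fun h => h2 h.symm
  have b3 : (("high" : String) == s) = false := by
    rw [beq_eq_false_iff_ne]; exact fun h => h3 h.symm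
  have b4 : (("critical" : String) == s) = false := by
    rw [beq_eq_false_iff_ne]; exact fun h => h4 h.symm
  have hi : pvSevOrder.items = [("low", (1 : Int)), ("medium", 2), ("high", 3), ("critical", 4)] := by
    decide
  have hg : pvSevOrder.getD s 2 = 2 := by
    simp [PySem.Dict.getD, PySem.Dict.get?, hi, List.find?, b1, b2, b3, b4]
  have hn : pvNormB s = "medium" := by
    simp [pvNormB, List.contains_eq_mem, h1, h3, h4]
  right; left; exact ⟨hg, hn⟩

-- the priority chain written out, for the 16-case comparison with A's scan
def pvChainB (det intel : String) : String :=
  if det = "critical" ∨ intel = "critical" then "critical"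
  else if det = "high" ∨ intel = "high" then "high"
  else if det = "medium" ∨ intel = "medium" then "medium"
  else "low"

-- ===== VERDICT (by name: the statement is the Claim_ definition above) =====
theorem determine_consensus_severity_py_spec : Claim_equal_determine_consensus_severity_py := by
  intro d i _
  unfold Spec_determine_consensus_severity_py determine_consensus_severity_py determine_consensus_severity_py_alt
  simp only
  set s := (PySem.Dict.ofList d).getD "severity" "medium" with hs
  set t := (PySem.Dict.ofList ((PySem.Dict.ofList i).getD "risk_assessment" [])).getD "risk_level" "medium" with ht
  show pvScanA pvSevOrder.items (max (pvSevOrder.getD s 2) (pvSevOrder.getD t 2)) = pvChainB (pvNormB s) (pvNormB t)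
  rcases pvNorm_spec s with ⟨e1, n1⟩ | ⟨e1, n1⟩ | ⟨e1, n1⟩ | ⟨e1, n1⟩ <;>
    rcases pvNorm_spec t with ⟨e2, n2⟩ | ⟨e2, n2⟩ | ⟨e2, n2⟩ | ⟨e2, n2⟩ <;>
    rw [e1, e2, n1, n2] <;> decide
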